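-- pv_equiv track=rewrite | github.com/Favo02/advent-of-code | 2023/day14/day14.py | tilt_nw
-- ===== SOURCE A (Python) =====
-- def tilt_nw(matrix, dirx, diry):
--   for y, row in enumerate(matrix):
--     for x, v in enumerate(row):
--       if v == "O":
--         cx, cy = x, y
--         while (0-dirx <= cx) and\
--               (0-diry <= cy) and\
--               matrix[cy+diry][cx+dirx] not in ["O", "#"]:
--           cx += dirx
--           cy += diry
--         matrix[y][x] = "."
--         matrix[cy][cx] = "O"
--   return matrix
-- ===== SOURCE B (Python) =====
-- def tilt_nw(matrix, dirx, diry):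
--   # One row-major sweep; `free` maps each line (column for a vertical tilt, row for a
--   # horizontal tilt) to the next landing slot, reset just past every '#' wall.
--   # Mutates `matrix` in place, like the original.
--   free = {}
--   for y in range(len(matrix)):
--     row = matrix[y]
--     for x in range(len(row)):
--       v = row[x]
--       if v == "O":
--         if diry:        # vertical tilt: rocks stack up their column
--           f = free.get(x, 0)
--           row[x] = "."
--           matrix[f][x] = "O"
--           free[x] = f + 1
--         elif dirx:      # horizontal tilt: rocks stack up their row
--           f = free.get(y, 0)
--           row[x] = "."
--           row[f] = "O"
--           free[y] = f + 1
--       elif v == "#":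
--         if diry:
--           free[x] = y + 1
--         elif dirx:
--           free[y] = x + 1
--   return matrix
-- ===== Notes on version B (the rewrite author's own statement) =====
-- stated objective: idiomatic
-- what changed: A walks every rock cell-by-cell through the grid until it hits a wall, rock or edge (a per-rock inner while loop); B makes a single row-major sweep keeping a dictionary of the next free landing slot per line (per column for a vertical tilt, per row for a horizontal one), reset just past each '#', so each rock is placed without any walking.
-- outside the precondition, e.g. on tilt_nw([['.', 'O', '#']], 1, 0): A returns [['.', 'O', '#']], B returns [['O', '.', '#']]; on tilt_nw([['#'], ['.'], ['O']], 0, -2): A returns [['#'], ['.'], ['O']], B returns [['#'], ['O'], ['.']]; on tilt_nw([['.', '.'], ['O']], 0, -1): A returns [['O', '.'], ['.']], B returns [['O', '.'], ['.']]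
import Mathlib
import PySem

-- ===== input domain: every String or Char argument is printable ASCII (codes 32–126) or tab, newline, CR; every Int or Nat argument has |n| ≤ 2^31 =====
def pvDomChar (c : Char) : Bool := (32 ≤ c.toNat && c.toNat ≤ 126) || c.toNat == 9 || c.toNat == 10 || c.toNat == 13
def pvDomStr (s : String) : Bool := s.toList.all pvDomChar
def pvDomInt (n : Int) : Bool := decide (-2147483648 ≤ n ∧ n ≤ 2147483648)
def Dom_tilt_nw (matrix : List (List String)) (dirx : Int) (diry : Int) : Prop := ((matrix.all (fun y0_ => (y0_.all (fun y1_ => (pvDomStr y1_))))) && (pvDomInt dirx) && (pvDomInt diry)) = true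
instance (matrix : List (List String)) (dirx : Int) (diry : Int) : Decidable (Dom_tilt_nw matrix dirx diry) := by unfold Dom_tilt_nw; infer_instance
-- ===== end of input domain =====

-- B replaces A's per-rock walking loop by one row-major sweep with a dictionary of
-- next-free landing slots per line (idiomatic one-pass solution).  Both A and B mutate
-- `matrix` in place in Python; the equivalence proved here is about the return value.

-- ===== PORT A =====

-- matrix[y][x] (read; callers only use in-range y, x)
def pvCell (m : List (List String)) (y x : Nat) : String := (m.getD y []).getD x ""

-- matrix[y][x] = v (in-range assignment; List.set is a no-op out of range)
def pvSetCell (m : List (List String)) (y x : Nat) (v : String) : List (List String) :=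
  m.set y ((m.getD y []).set x v)

-- the `while` loop of A: slide (cx,cy) by (dirx,diry) while the guard holds.
-- `none` from pyGet? is where Python raises IndexError (outside Pre_): the walk stops there.
-- fuel: under Pre_ each step strictly decreases cx+cy, which starts at x+y ≥ 0.
def pvWalkA (m : List (List String)) (dirx diry : Int) : Nat → Int → Int → Int × Int
  | 0, cx, cy => (cx, cy)
  | fuel+1, cx, cy =>
    if 0 - dirx ≤ cx ∧ 0 - diry ≤ cy then
      match PySem.List.pyGet? m (cy + diry) with
      | none => (cx, cy)
      | some r =>
        match PySem.List.pyGet? r (cx + dirx) with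
        | none => (cx, cy)
        | some v =>
          if v = "O" ∨ v = "#" then (cx, cy)
          else pvWalkA m dirx diry fuel (cx + dirx) (cy + diry)
    else (cx, cy)

-- body of A's double loop at cell (y,x)
def pvStepA (dirx diry : Int) (m : List (List String)) (y x : Nat) : List (List String) :=
  if pvCell m y x = "O" then
    let p := pvWalkA m dirx diry (x + y + 1) (x : Int) (y : Int)
    let m1 := pvSetCell m y x "."
    -- the final coordinates are nonnegative whenever the walk only made guarded steps;
    -- the test is only for Int.toNat (a negative index = Python wraparound, outside Pre_)
    if 0 ≤ p.2 ∧ 0 ≤ p.1 then pvSetCell m1 p.2.toNat p.1.toNat "O" else m1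
  else m

def tilt_nw (matrix : List (List String)) (dirx : Int) (diry : Int) : List (List String) :=
  (List.range matrix.length).foldl
    (fun m y =>
      (List.range ((m.getD y []).length)).foldl
        (fun m2 x => pvStepA dirx diry m2 y x) m)
    matrix

-- ===== PORT B =====

-- body of B's double loop at cell (y,x); state = (free-slot dict, matrix).
-- dict values are Python ints that are nonnegative by construction, kept as Nat.
def pvStepB (dirx diry : Int) (s : PySem.Dict Int Nat × List (List String)) (y x : Nat) :
    PySem.Dict Int Nat × List (List String) :=
  let v := pvCell s.2 y x
  if v = "O" then
    if diry ≠ 0 then        -- vertical tilt: rocks stack up their column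
      let f := s.1.getD (x : Int) 0
      (s.1.insert (x : Int) (f + 1), pvSetCell (pvSetCell s.2 y x ".") f x "O")
    else if dirx ≠ 0 then   -- horizontal tilt: rocks stack up their row
      let f := s.1.getD (y : Int) 0
      (s.1.insert (y : Int) (f + 1), pvSetCell (pvSetCell s.2 y x ".") y f "O")
    else s
  else if v = "#" then
    (if diry ≠ 0 then s.1.insert (x : Int) (y + 1)
     else if dirx ≠ 0 then s.1.insert (y : Int) (x + 1)
     else s.1, s.2)
  else s

def tilt_nw_alt (matrix : List (List String)) (dirx : Int) (diry : Int) : List (List String) :=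
  ((List.range matrix.length).foldl
    (fun s y =>
      (List.range ((s.2.getD y []).length)).foldl
        (fun s2 x => pvStepB dirx diry s2 y x) s)
    (PySem.Dict.empty, matrix)).2

-- ===== PRECONDITION & SPEC =====

-- no cell of the matrix is a rock "O" (then nothing ever moves, in any direction)
def pvNoO (m : List (List String)) : Prop := ∀ r ∈ m, ∀ v ∈ r, v ≠ "O"
-- all rows have the same length
def pvRect (m : List (List String)) : Prop := ∀ r ∈ m, r.length = (m.headD []).length

-- Pre_ keeps A's natural domain: when a rock "O" is present, the tilt vector must be one of
-- the unit north/west directions the function's name refers to ((0,-1) or (-1,0)), and for the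
-- north tilt the grid must be rectangular; outside this A raises IndexError (rocks sliding past
-- the edge or over a missing cell of a jagged grid) or returns accidental step-size-dependent
-- positions produced by its lower-bound-only guard (see the cites in claim.json).
def Pre_tilt_nw (matrix : List (List String)) (dirx : Int) (diry : Int) : Prop :=
  pvNoO matrix ∨ (dirx = -1 ∧ diry = 0) ∨ (pvRect matrix ∧ dirx = 0 ∧ diry = -1)

instance (matrix : List (List String)) (dirx : Int) (diry : Int) : Decidable (Pre_tilt_nw matrix dirx diry) := by
  unfold Pre_tilt_nw pvNoO pvRect; infer_instance

def pvWitness_tilt_nw : List (List String) × Int × Int :=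
  ([["O", ".", "#"], [".", "#", "O"], ["O", "O", "."]], 0, -1)

def Spec_tilt_nw (matrix : List (List String)) (dirx : Int) (diry : Int) (out : List (List String)) : Prop := out = tilt_nw_alt matrix dirx diry
instance (matrix : List (List String)) (dirx : Int) (diry : Int) (out : List (List String)) : Decidable (Spec_tilt_nw matrix dirx diry out) := by unfold Spec_tilt_nw; infer_instance

-- ===== CLAIM (what is proved, stated in full; the proofs are below) =====
def Claim_equal_tilt_nw : Prop := ∀ (matrix : List (List String)) (dirx : Int) (diry : Int), Dom_tilt_nw matrix dirx diry → Pre_tilt_nw matrix dirx diry → Spec_tilt_nw matrix dirx diry (tilt_nw matrix dirx diry)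


-- ===== LEMMAS AND PROOFS =====

-- a cell is passable (a rock slides through) / blocks
def pvPass (v : String) : Prop := v ≠ "O" ∧ v ≠ "#"
def pvBlk (v : String) : Prop := v = "O" ∨ v = "#"

-- shape of m agrees with the original matrix m0 (row count and each row's length)
def pvShape (m0 m : List (List String)) : Prop :=
  m.length = m0.length ∧ ∀ y, ((m.getD y []).length = (m0.getD y []).length)

theorem pvShape_refl (m0 : List (List String)) : pvShape m0 m0 := ⟨rfl, fun _ => rfl⟩

theorem pv_getD_eq_getElem {α : Type} (l : List α) (n : Nat) (d : α) (h : n < l.length) :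
    l.getD n d = l[n] := by
  rw [List.getD_eq_getElem?_getD, List.getElem?_eq_getElem h]; rfl

theorem pv_len_set (m : List (List String)) (y x : Nat) (v : String) :
    (pvSetCell m y x v).length = m.length := by
  simp [pvSetCell]

theorem pv_rowlen_set (m : List (List String)) (y x : Nat) (v : String) (y' : Nat) :
    ((pvSetCell m y x v).getD y' []).length = (m.getD y' []).length := by
  unfold pvSetCell
  rw [List.getD_eq_getElem?_getD, List.getD_eq_getElem?_getD, List.getElem?_set]
  by_cases h : y = y'
  · subst h
    by_cases hl : y < m.length
    · simp [hl]
    · simp [hl]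
  · simp [h]

theorem pvShape_set (m0 m : List (List String)) (y x : Nat) (v : String)
    (h : pvShape m0 m) : pvShape m0 (pvSetCell m y x v) := by
  refine ⟨?_, fun y' => ?_⟩
  · rw [pv_len_set, h.1]
  · rw [pv_rowlen_set, h.2 y']

theorem pv_cell_set_self (m : List (List String)) (y x : Nat) (v : String)
    (hy : y < m.length) (hx : x < (m.getD y []).length) :
    pvCell (pvSetCell m y x v) y x = v := by
  have hx' : x < m[y].length := by rwa [pv_getD_eq_getElem m y [] hy] at hx
  unfold pvCell pvSetCell
  simp [List.getD_eq_getElem?_getD, hy, hx']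

theorem pv_cell_set_ne (m : List (List String)) (y x : Nat) (v : String) (y' x' : Nat)
    (h : y' ≠ y ∨ x' ≠ x) :
    pvCell (pvSetCell m y x v) y' x' = pvCell m y' x' := by
  unfold pvCell pvSetCell
  by_cases hyy : y' = y
  · subst hyy
    have hx : x' ≠ x := h.resolve_left (by simp)
    by_cases hl : y' < m.length
    · simp [List.getD_eq_getElem?_getD, hl,
        (show x ≠ x' from fun hh => hx hh.symm)]
    · simp [List.getD_eq_getElem?_getD, hl]
  · simp [List.getD_eq_getElem?_getD,
      (show y ≠ y' from fun hh => hyy hh.symm)]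

-- the current row length of a rectangular matrix (through a shape change)
theorem pv_rowlen_rect (m0 m : List (List String)) (C : Nat)
    (hC : ∀ r ∈ m0, r.length = C) (hsh : pvShape m0 m) (y : Nat) (hy : y < m0.length) :
    (m.getD y []).length = C := by
  rw [hsh.2 y, pv_getD_eq_getElem m0 y [] hy]
  exact hC _ (List.getElem_mem hy)

-- ---------- the no-rock case: nothing ever moves ----------

theorem pv_getD_mem_or {α : Type} [DecidableEq α] (l : List α) (n : Nat) (d : α) :
    l.getD n d = d ∨ l.getD n d ∈ l := by
  rw [List.getD_eq_getElem?_getD]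
  cases e : l[n]? with
  | none => simp
  | some a => simp [List.mem_of_getElem? e]

theorem pv_cell_noO (m : List (List String)) (h : pvNoO m) (y x : Nat) :
    pvCell m y x ≠ "O" := by
  unfold pvCell
  rcases pv_getD_mem_or m y [] with hr | hr
  · rw [hr]; rcases pv_getD_mem_or ([] : List String) x "" with hc | hc
    · rw [hc]; decide
    · simp at hc
  · rcases pv_getD_mem_or (m.getD y []) x "" with hc | hc
    · rw [hc]; decide
    · exact h _ hr _ hc

theorem pv_foldl_fixed {α β : Type} (f : α → β → α) (a : α) (h : ∀ b, f a b = a) :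
    ∀ l : List β, l.foldl f a = a
  | [] => rfl
  | b :: l => by rw [List.foldl_cons, h b]; exact pv_foldl_fixed f a h l

theorem pv_noO_A (m0 : List (List String)) (dirx diry : Int) (h : pvNoO m0) :
    tilt_nw m0 dirx diry = m0 := by
  unfold tilt_nw
  apply pv_foldl_fixed
  intro y
  apply pv_foldl_fixed
  intro x
  unfold pvStepA
  rw [if_neg (pv_cell_noO m0 h y x)]

theorem pv_stepB_snd_noO (m0 : List (List String)) (h : pvNoO m0) (dirx diry : Int)
    (y x : Nat) (s : PySem.Dict Int Nat × List (List String)) (hs : s.2 = m0) :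
    (pvStepB dirx diry s y x).2 = m0 := by
  unfold pvStepB
  rw [hs]
  rw [if_neg (pv_cell_noO m0 h y x)]
  split <;> simpa using hs

theorem pv_foldB_snd_noO (m0 : List (List String)) (h : pvNoO m0) (dirx diry : Int)
    (y : Nat) :
    ∀ (l : List Nat) (s : PySem.Dict Int Nat × List (List String)), s.2 = m0 →
      (l.foldl (fun s2 x => pvStepB dirx diry s2 y x) s).2 = m0 := by
  intro l
  induction l with
  | nil => intro s hs; exact hs
  | cons b t ih =>
    intro s hs
    rw [List.foldl_cons]
    exact ih _ (pv_stepB_snd_noO m0 h dirx diry y b s hs)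

theorem pv_noO_B (m0 : List (List String)) (dirx diry : Int) (h : pvNoO m0) :
    tilt_nw_alt m0 dirx diry = m0 := by
  unfold tilt_nw_alt
  have main : ∀ (l : List Nat) (s : PySem.Dict Int Nat × List (List String)), s.2 = m0 →
      (l.foldl (fun s y => (List.range ((s.2.getD y []).length)).foldl
        (fun s2 x => pvStepB dirx diry s2 y x) s) s).2 = m0 := by
    intro l
    induction l with
    | nil => intro s hs; exact hs
    | cons b t ih =>
      intro s hs
      rw [List.foldl_cons]
      exact ih _ (pv_foldB_snd_noO m0 h dirx diry b _ s hs)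
  exact main _ _ rfl

-- ---------- the walk of A, characterised along a line ----------

theorem pv_walk_north (m : List (List String)) (C : Nat) (hrect : ∀ r ∈ m, r.length = C)
    (X f : Nat) (hXC : X < C)
    (hblk : f = 0 ∨ pvBlk (pvCell m (f - 1) X)) :
    ∀ (fuel k : Nat), f ≤ k → k < m.length → k - f < fuel →
    (∀ j, f ≤ j → j < k → pvPass (pvCell m j X)) →
    pvWalkA m 0 (-1) fuel (X : Int) (k : Int) = ((X : Int), (f : Int)) := by
  intro fuel
  induction fuel with
  | zero => intro k h1 h2 h3 _; exact absurd h3 (by omega)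
  | succ n ih =>
    intro k hfk hk hfuel hpass
    show (if 0 - 0 ≤ (X : Int) ∧ 0 - (-1) ≤ (k : Int) then _ else _) = _
    by_cases hk0 : k = 0
    · subst hk0
      have hf0 : f = 0 := by omega
      subst hf0
      rw [if_neg (by rintro ⟨h1, h2⟩; push_cast at h1 h2; all_goals omega)]
    · rw [if_pos ⟨by push_cast; omega, by push_cast; omega⟩]
      have hkm : k - 1 < m.length := by omega
      have hcast : (k : Int) + (-1) = ((k - 1 : Nat) : Int) := by push_cast; omega
      rw [hcast, PySem.List.pyGet?_natCast, List.getElem?_eq_getElem hkm]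
      show (match PySem.List.pyGet? (m[k-1]) ((X : Int) + 0) with | none => _ | some v => _) = _
      have hrl : X < (m[k-1]).length := by rw [hrect _ (List.getElem_mem hkm)]; exact hXC
      rw [show (X : Int) + 0 = (X : Int) by ring, PySem.List.pyGet?_natCast,
        List.getElem?_eq_getElem hrl]
      show (if m[k-1][X] = "O" ∨ m[k-1][X] = "#" then _ else _) = _
      have hcellv : pvCell m (k-1) X = m[k-1][X] := by
        unfold pvCell
        rw [pv_getD_eq_getElem m (k-1) [] hkm, pv_getD_eq_getElem _ X "" hrl]
      by_cases hkf : k = f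
      · -- at the blocker (or the start slot itself); the guard saw the blocking cell
        have hbl : pvBlk (pvCell m (f - 1) X) := by
          rcases hblk with h0 | hb
          · omega
          · exact hb
        rw [if_pos (by rw [← hcellv, hkf]; exact hbl)]
        rw [hkf]
      · -- a passable cell: step and recurse
        have hp := hpass (k-1) (by omega) (by omega)
        rw [if_neg (by rw [← hcellv]; rintro (h | h) <;> [exact hp.1 h; exact hp.2 h])]
        exact ih (k-1) (by omega) hkm (by omega) (fun j h1 h2 => hpass j h1 (by omega))

theorem pv_walk_west (m : List (List String)) (Y f : Nat) (hY : Y < m.length)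
    (hblk : f = 0 ∨ pvBlk (pvCell m Y (f - 1))) :
    ∀ (fuel k : Nat), f ≤ k → k < (m.getD Y []).length → k - f < fuel →
    (∀ j, f ≤ j → j < k → pvPass (pvCell m Y j)) →
    pvWalkA m (-1) 0 fuel (k : Int) (Y : Int) = ((f : Int), (Y : Int)) := by
  intro fuel
  induction fuel with
  | zero => intro k h1 h2 h3 _; exact absurd h3 (by omega)
  | succ n ih =>
    intro k hfk hk hfuel hpass
    show (if 0 - (-1) ≤ (k : Int) ∧ 0 - 0 ≤ (Y : Int) then _ else _) = _
    by_cases hk0 : k = 0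
    · subst hk0
      have hf0 : f = 0 := by omega
      subst hf0
      rw [if_neg (by rintro ⟨h1, h2⟩; push_cast at h1 h2; all_goals omega)]
    · rw [if_pos ⟨by push_cast; omega, by push_cast; omega⟩]
      have hcast : (Y : Int) + 0 = (Y : Int) := by ring
      rw [hcast, PySem.List.pyGet?_natCast, List.getElem?_eq_getElem hY]
      have hkm : k - 1 < (m[Y]).length := by
        rw [← pv_getD_eq_getElem m Y [] hY]; omega
      have hcast2 : (k : Int) + (-1) = ((k - 1 : Nat) : Int) := by push_cast; omega
      show (match PySem.List.pyGet? (m[Y]) ((k : Int) + (-1)) with | none => _ | some v => _) = _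
      rw [hcast2, PySem.List.pyGet?_natCast, List.getElem?_eq_getElem hkm]
      show (if m[Y][k-1] = "O" ∨ m[Y][k-1] = "#" then _ else _) = _
      have hcellv : pvCell m Y (k-1) = m[Y][k-1] := by
        unfold pvCell
        rw [pv_getD_eq_getElem m Y [] hY, pv_getD_eq_getElem _ (k-1) "" hkm]
      by_cases hkf : k = f
      · have hbl : pvBlk (pvCell m Y (f - 1)) := by
          rcases hblk with h0 | hb
          · omega
          · exact hb
        rw [if_pos (by rw [← hcellv, hkf]; exact hbl)]
        rw [hkf]
      · have hp := hpass (k-1) (by omega) (by omega)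
        rw [if_neg (by rw [← hcellv]; rintro (h | h) <;> [exact hp.1 h; exact hp.2 h])]
        exact ih (k-1) (by omega) (by omega) (by omega) (fun j h1 h2 => hpass j h1 (by omega))

-- ---------- the north tilt ((dirx,diry) = (0,-1)): per-column free slots ----------

-- number of already-scanned cells of column x when the scan is at row Y, column X
def pvSN (Y X x : Nat) : Nat := if x < X then Y + 1 else Y

-- the sweep invariant, per column x: the free slot is within the scanned prefix of the
-- column, everything from it up to the scan line is passable, and the cell just before
-- it (if any) blocks
def pvInvN (m : List (List String)) (fr : PySem.Dict Int Nat) (C Y X : Nat) : Prop :=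
  ∀ x, x < C →
    fr.getD (x : Int) 0 ≤ pvSN Y X x ∧
    (∀ j, fr.getD (x : Int) 0 ≤ j → j < pvSN Y X x → pvPass (pvCell m j x)) ∧
    (fr.getD (x : Int) 0 = 0 ∨ pvBlk (pvCell m (fr.getD (x : Int) 0 - 1) x))

theorem pv_stepN (m0 : List (List String)) (C : Nat) (hC : ∀ r ∈ m0, r.length = C)
    (m : List (List String)) (fr : PySem.Dict Int Nat) (Y X : Nat)
    (hsh : pvShape m0 m) (hY : Y < m0.length) (hX : X < C)
    (hinv : pvInvN m fr C Y X) :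
    pvStepA 0 (-1) m Y X = (pvStepB 0 (-1) (fr, m) Y X).2 ∧
    pvShape m0 (pvStepB 0 (-1) (fr, m) Y X).2 ∧
    pvInvN (pvStepB 0 (-1) (fr, m) Y X).2 (pvStepB 0 (-1) (fr, m) Y X).1 C Y (X + 1) := by
  have hYm : Y < m.length := by rw [hsh.1]; exact hY
  have hrowY : (m.getD Y []).length = C := pv_rowlen_rect m0 m C hC hsh Y hY
  have hXr : X < (m.getD Y []).length := by omega
  have hrect : ∀ r ∈ m, r.length = C := by
    intro r hr
    obtain ⟨i, hi, rfl⟩ := List.mem_iff_getElem.mp hr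
    rw [← pv_getD_eq_getElem m i [] hi]
    exact pv_rowlen_rect m0 m C hC hsh i (by rw [← hsh.1]; exact hi)
  obtain ⟨hf1, hf2, hf3⟩ := hinv X hX
  have hSNX : pvSN Y X X = Y := by simp [pvSN]
  rw [hSNX] at hf1 hf2
  by_cases hO : pvCell m Y X = "O"
  · -- a rock: A walks it to the column's free slot, B writes it there directly
    have hwalk : pvWalkA m 0 (-1) (X + Y + 1) (X : Int) (Y : Int)
        = ((X : Int), ((fr.getD (X : Int) 0 : Nat) : Int)) :=
      pv_walk_north m C hrect X (fr.getD (X : Int) 0) hX hf3 (X + Y + 1) Y hf1 hYm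
        (by omega) hf2
    have hstepA : pvStepA 0 (-1) m Y X
        = pvSetCell (pvSetCell m Y X ".") (fr.getD (X : Int) 0) X "O" := by
      unfold pvStepA
      rw [if_pos hO]
      simp [hwalk]
    have hstepB : pvStepB 0 (-1) (fr, m) Y X
        = (fr.insert (X : Int) (fr.getD (X : Int) 0 + 1),
           pvSetCell (pvSetCell m Y X ".") (fr.getD (X : Int) 0) X "O") := by
      simp [pvStepB, hO]
    rw [hstepA, hstepB]
    dsimp only
    set f := fr.getD (X : Int) 0 with hfdef
    have hfm0 : f < m0.length := by omega
    have hshA : pvShape m0 (pvSetCell (pvSetCell m Y X ".") f X "O") :=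
      pvShape_set _ _ _ _ _ (pvShape_set _ _ _ _ _ hsh)
    refine ⟨rfl, hshA, fun x hx => ?_⟩
    by_cases hxX : x = X
    · subst hxX
      have hg : (fr.insert (x : Int) (f + 1)).getD (x : Int) 0 = f + 1 := by
        rw [PySem.Dict.getD_insert]; simp
      rw [hg]
      have hsn : pvSN Y (x + 1) x = Y + 1 := by simp [pvSN]
      rw [hsn]
      refine ⟨by omega, fun j hj1 hj2 => ?_, Or.inr ?_⟩
      · by_cases hjY : j = Y
        · subst hjY
          have hfj : f ≠ j := by omega
          rw [pv_cell_set_ne _ _ _ _ _ _ (Or.inl (fun hh => hfj hh.symm)),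
            pv_cell_set_self m j x "." hYm hXr]
          exact ⟨by decide, by decide⟩
        · have hjf : j ≠ f := by omega
          have hjY' : j ≠ Y := hjY
          rw [pv_cell_set_ne _ _ _ _ _ _ (Or.inl hjf),
            pv_cell_set_ne _ _ _ _ _ _ (Or.inl hjY')]
          exact hf2 j (by omega) (by omega)
      · have : f + 1 - 1 = f := by omega
        rw [this]
        have hfl : f < (pvSetCell m Y x ".").length := by rw [pv_len_set, hsh.1]; omega
        have hfr : x < ((pvSetCell m Y x ".").getD f []).length := by
          rw [pv_rowlen_set, pv_rowlen_rect m0 m C hC hsh f hfm0]; omega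
        rw [pv_cell_set_self _ f x "O" hfl hfr]
        exact Or.inl rfl
    · have hxXi : (x : Int) ≠ (X : Int) := by exact_mod_cast hxX
      have hg : (fr.insert (X : Int) (f + 1)).getD (x : Int) 0 = fr.getD (x : Int) 0 := by
        rw [PySem.Dict.getD_insert]; simp [hxXi]
      rw [hg]
      have hsn : pvSN Y (X + 1) x = pvSN Y X x := by
        unfold pvSN; split_ifs <;> omega
      rw [hsn]
      obtain ⟨g1, g2, g3⟩ := hinv x hx
      have hcells : ∀ j, pvCell (pvSetCell (pvSetCell m Y X ".") f X "O") j x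
          = pvCell m j x := by
        intro j
        rw [pv_cell_set_ne _ _ _ _ _ _ (Or.inr hxX), pv_cell_set_ne _ _ _ _ _ _ (Or.inr hxX)]
      refine ⟨g1, fun j hj1 hj2 => ?_, ?_⟩
      · rw [hcells]; exact g2 j hj1 hj2
      · rw [hcells]; exact g3
  · by_cases hH : pvCell m Y X = "#"
    · -- a wall: A does nothing, B resets the column's free slot below it
      have hstepA : pvStepA 0 (-1) m Y X = m := by unfold pvStepA; rw [if_neg hO]
      have hstepB : pvStepB 0 (-1) (fr, m) Y X = (fr.insert (X : Int) (Y + 1), m) := by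
        simp [pvStepB, hH]
      rw [hstepA, hstepB]
      dsimp only
      refine ⟨rfl, hsh, fun x hx => ?_⟩
      by_cases hxX : x = X
      · subst hxX
        have hg : (fr.insert (x : Int) (Y + 1)).getD (x : Int) 0 = Y + 1 := by
          rw [PySem.Dict.getD_insert]; simp
        rw [hg]
        have hsn : pvSN Y (x + 1) x = Y + 1 := by simp [pvSN]
        rw [hsn]
        refine ⟨le_refl _, fun j hj1 hj2 => by omega, Or.inr ?_⟩
        have : Y + 1 - 1 = Y := by omega
        rw [this]
        exact Or.inr hH
      · have hxXi : (x : Int) ≠ (X : Int) := by exact_mod_cast hxX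
        have hg : (fr.insert (X : Int) (Y + 1)).getD (x : Int) 0 = fr.getD (x : Int) 0 := by
          rw [PySem.Dict.getD_insert]; simp [hxXi]
        rw [hg]
        have hsn : pvSN Y (X + 1) x = pvSN Y X x := by
          unfold pvSN; split_ifs <;> omega
        rw [hsn]
        exact hinv x hx
    · -- a passable cell: nothing happens, the scanned prefix of column X grows by it
      have hstepA : pvStepA 0 (-1) m Y X = m := by unfold pvStepA; rw [if_neg hO]
      have hstepB : pvStepB 0 (-1) (fr, m) Y X = (fr, m) := by
        simp [pvStepB, hO, hH]
      rw [hstepA, hstepB]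
      dsimp only
      refine ⟨rfl, hsh, fun x hx => ?_⟩
      by_cases hxX : x = X
      · subst hxX
        have hsn : pvSN Y (x + 1) x = Y + 1 := by simp [pvSN]
        rw [hsn]
        refine ⟨by omega, fun j hj1 hj2 => ?_, hf3⟩
        by_cases hjY : j = Y
        · subst hjY; exact ⟨hO, hH⟩
        · exact hf2 j hj1 (by omega)
      · have hsn : pvSN Y (X + 1) x = pvSN Y X x := by
          unfold pvSN; split_ifs <;> omega
        rw [hsn]
        exact hinv x hx

theorem pv_foldN (m0 : List (List String)) (C : Nat) (hC : ∀ r ∈ m0, r.length = C)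
    (Y : Nat) (hY : Y < m0.length)
    (m : List (List String)) (fr : PySem.Dict Int Nat)
    (hsh : pvShape m0 m) (hinv : pvInvN m fr C Y 0) :
    ∀ n, n ≤ C →
      (List.range n).foldl (fun m2 x => pvStepA 0 (-1) m2 Y x) m
        = ((List.range n).foldl (fun s2 x => pvStepB 0 (-1) s2 Y x) (fr, m)).2 ∧
      pvShape m0 ((List.range n).foldl (fun s2 x => pvStepB 0 (-1) s2 Y x) (fr, m)).2 ∧
      pvInvN ((List.range n).foldl (fun s2 x => pvStepB 0 (-1) s2 Y x) (fr, m)).2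
             ((List.range n).foldl (fun s2 x => pvStepB 0 (-1) s2 Y x) (fr, m)).1 C Y n := by
  intro n
  induction n with
  | zero =>
    intro _
    simp only [List.range_zero, List.foldl_nil]
    exact ⟨by trivial, hsh, hinv⟩
  | succ n ih =>
    intro hn
    obtain ⟨he, hs, hi⟩ := ih (by omega)
    rw [List.range_succ, List.foldl_append, List.foldl_append, List.foldl_cons,
      List.foldl_nil, List.foldl_cons, List.foldl_nil, he]
    have hstep := pv_stepN m0 C hC
      ((List.range n).foldl (fun s2 x => pvStepB 0 (-1) s2 Y x) (fr, m)).2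
      ((List.range n).foldl (fun s2 x => pvStepB 0 (-1) s2 Y x) (fr, m)).1
      Y n hs hY (by omega) hi
    simp only [Prod.mk.eta] at hstep
    exact hstep

theorem pvInvN_roll (m : List (List String)) (fr : PySem.Dict Int Nat) (C Y : Nat)
    (h : pvInvN m fr C Y C) : pvInvN m fr C (Y + 1) 0 := by
  intro x hx
  have hh := h x hx
  have hsn : pvSN Y C x = pvSN (Y + 1) 0 x := by unfold pvSN; split_ifs <;> omega
  rwa [hsn] at hh

theorem pv_outerN (m0 : List (List String)) (C : Nat) (hC : ∀ r ∈ m0, r.length = C) :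
    ∀ Y, Y ≤ m0.length →
      (List.range Y).foldl (fun m y => (List.range ((m.getD y []).length)).foldl
          (fun m2 x => pvStepA 0 (-1) m2 y x) m) m0
        = ((List.range Y).foldl (fun s y => (List.range ((s.2.getD y []).length)).foldl
          (fun s2 x => pvStepB 0 (-1) s2 y x) s) (PySem.Dict.empty, m0)).2 ∧
      pvShape m0 ((List.range Y).foldl (fun s y => (List.range ((s.2.getD y []).length)).foldl
          (fun s2 x => pvStepB 0 (-1) s2 y x) s) (PySem.Dict.empty, m0)).2 ∧
      pvInvN ((List.range Y).foldl (fun s y => (List.range ((s.2.getD y []).length)).foldl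
          (fun s2 x => pvStepB 0 (-1) s2 y x) s) (PySem.Dict.empty, m0)).2
        ((List.range Y).foldl (fun s y => (List.range ((s.2.getD y []).length)).foldl
          (fun s2 x => pvStepB 0 (-1) s2 y x) s) (PySem.Dict.empty, m0)).1 C Y 0 := by
  intro Y
  induction Y with
  | zero =>
    intro _
    simp only [List.range_zero, List.foldl_nil]
    refine ⟨by trivial, pvShape_refl m0, fun x hx => ?_⟩
    rw [PySem.Dict.getD_empty]
    have hsn : pvSN 0 0 x = 0 := by simp [pvSN]
    rw [hsn]
    exact ⟨le_refl _, fun j hj1 hj2 => by omega, Or.inl rfl⟩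
  | succ Y ih =>
    intro hY1
    obtain ⟨he, hs, hi⟩ := ih (by omega)
    rw [List.range_succ, List.foldl_append, List.foldl_append, List.foldl_cons,
      List.foldl_nil, List.foldl_cons, List.foldl_nil, he]
    have hrow : ((((List.range Y).foldl (fun s y => (List.range ((s.2.getD y []).length)).foldl
          (fun s2 x => pvStepB 0 (-1) s2 y x) s) (PySem.Dict.empty, m0)).2).getD Y []).length
        = C := pv_rowlen_rect m0 _ C hC hs Y (by omega)
    rw [hrow]
    have hfold := pv_foldN m0 C hC Y (by omega) _ _ hs hi C (le_refl C)
    simp only [Prod.mk.eta] at hfold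
    exact ⟨hfold.1, hfold.2.1, pvInvN_roll _ _ C Y hfold.2.2⟩

-- ---------- the west tilt ((dirx,diry) = (-1,0)): per-row free slots ----------

-- the sweep invariant while scanning row Y at column X: rows below are untouched,
-- the free slot of row Y lies in its scanned prefix with passable cells after it
def pvInvW (m : List (List String)) (fr : PySem.Dict Int Nat) (Y X : Nat) : Prop :=
  (∀ y' : Nat, Y < y' → fr.get? (y' : Int) = none) ∧
  fr.getD (Y : Int) 0 ≤ X ∧
  (∀ j, fr.getD (Y : Int) 0 ≤ j → j < X → pvPass (pvCell m Y j)) ∧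
  (fr.getD (Y : Int) 0 = 0 ∨ pvBlk (pvCell m Y (fr.getD (Y : Int) 0 - 1)))

theorem pv_stepW (m0 : List (List String))
    (m : List (List String)) (fr : PySem.Dict Int Nat) (Y X : Nat)
    (hsh : pvShape m0 m) (hY : Y < m0.length) (hX : X < (m.getD Y []).length)
    (hinv : pvInvW m fr Y X) :
    pvStepA (-1) 0 m Y X = (pvStepB (-1) 0 (fr, m) Y X).2 ∧
    pvShape m0 (pvStepB (-1) 0 (fr, m) Y X).2 ∧
    pvInvW (pvStepB (-1) 0 (fr, m) Y X).2 (pvStepB (-1) 0 (fr, m) Y X).1 Y (X + 1) := by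
  have hYm : Y < m.length := by rw [hsh.1]; exact hY
  obtain ⟨hnone, hf1, hf2, hf3⟩ := hinv
  by_cases hO : pvCell m Y X = "O"
  · have hwalk : pvWalkA m (-1) 0 (X + Y + 1) (X : Int) (Y : Int)
        = (((fr.getD (Y : Int) 0 : Nat) : Int), (Y : Int)) :=
      pv_walk_west m Y (fr.getD (Y : Int) 0) hYm hf3 (X + Y + 1) X hf1 hX (by omega) hf2
    have hstepA : pvStepA (-1) 0 m Y X
        = pvSetCell (pvSetCell m Y X ".") Y (fr.getD (Y : Int) 0) "O" := by
      unfold pvStepA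
      rw [if_pos hO]
      simp [hwalk]
    have hstepB : pvStepB (-1) 0 (fr, m) Y X
        = (fr.insert (Y : Int) (fr.getD (Y : Int) 0 + 1),
           pvSetCell (pvSetCell m Y X ".") Y (fr.getD (Y : Int) 0) "O") := by
      simp [pvStepB, hO]
    rw [hstepA, hstepB]
    dsimp only
    set f := fr.getD (Y : Int) 0 with hfdef
    have hshA : pvShape m0 (pvSetCell (pvSetCell m Y X ".") Y f "O") :=
      pvShape_set _ _ _ _ _ (pvShape_set _ _ _ _ _ hsh)
    refine ⟨rfl, hshA, fun y' hy' => ?_, ?_, fun j hj1 hj2 => ?_, Or.inr ?_⟩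
    · have hyY : (y' : Int) ≠ (Y : Int) := by
        have : y' ≠ Y := by omega
        exact_mod_cast this
      rw [PySem.Dict.get?_insert_of_ne _ _ hyY]
      exact hnone y' hy'
    · rw [PySem.Dict.getD_insert]; simp only [if_true]; omega
    · rw [PySem.Dict.getD_insert] at hj1
      simp only [if_true] at hj1
      by_cases hjX : j = X
      · subst hjX
        have hfj : f ≠ j := by omega
        rw [pv_cell_set_ne _ _ _ _ _ _ (Or.inr (fun hh => hfj hh.symm)),
          pv_cell_set_self m Y j "." hYm hX]
        exact ⟨by decide, by decide⟩
      · have hjf : j ≠ f := by omega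
        have hjX' : j ≠ X := hjX
        rw [pv_cell_set_ne _ _ _ _ _ _ (Or.inr hjf),
          pv_cell_set_ne _ _ _ _ _ _ (Or.inr hjX')]
        exact hf2 j (by omega) (by omega)
    · rw [PySem.Dict.getD_insert]
      simp only [if_true]
      have h11 : f + 1 - 1 = f := by omega
      rw [h11]
      have hfl : Y < (pvSetCell m Y X ".").length := by rw [pv_len_set]; exact hYm
      have hfr : f < ((pvSetCell m Y X ".").getD Y []).length := by
        rw [pv_rowlen_set]; omega
      rw [pv_cell_set_self _ Y f "O" hfl hfr]
      exact Or.inl rfl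
  · by_cases hH : pvCell m Y X = "#"
    · have hstepA : pvStepA (-1) 0 m Y X = m := by unfold pvStepA; rw [if_neg hO]
      have hstepB : pvStepB (-1) 0 (fr, m) Y X = (fr.insert (Y : Int) (X + 1), m) := by
        simp [pvStepB, hH]
      rw [hstepA, hstepB]
      dsimp only
      refine ⟨rfl, hsh, fun y' hy' => ?_, ?_, fun j hj1 hj2 => ?_, Or.inr ?_⟩
      · have hyY : (y' : Int) ≠ (Y : Int) := by
          have : y' ≠ Y := by omega
          exact_mod_cast this
        rw [PySem.Dict.get?_insert_of_ne _ _ hyY]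
        exact hnone y' hy'
      · rw [PySem.Dict.getD_insert]; simp only [if_true]; omega
      · rw [PySem.Dict.getD_insert] at hj1
        simp only [if_true] at hj1
        omega
      · rw [PySem.Dict.getD_insert]
        simp only [if_true]
        have h11 : X + 1 - 1 = X := by omega
        rw [h11]
        exact Or.inr hH
    · have hstepA : pvStepA (-1) 0 m Y X = m := by unfold pvStepA; rw [if_neg hO]
      have hstepB : pvStepB (-1) 0 (fr, m) Y X = (fr, m) := by
        simp [pvStepB, hO, hH]
      rw [hstepA, hstepB]
      dsimp only
      refine ⟨rfl, hsh, hnone, by omega, fun j hj1 hj2 => ?_, hf3⟩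
      by_cases hjX : j = X
      · subst hjX; exact ⟨hO, hH⟩
      · exact hf2 j hj1 (by omega)

theorem pv_foldW (m0 : List (List String)) (Y : Nat) (hY : Y < m0.length)
    (m : List (List String)) (fr : PySem.Dict Int Nat)
    (hsh : pvShape m0 m) (hinv : pvInvW m fr Y 0) :
    ∀ n, n ≤ (m0.getD Y []).length →
      (List.range n).foldl (fun m2 x => pvStepA (-1) 0 m2 Y x) m
        = ((List.range n).foldl (fun s2 x => pvStepB (-1) 0 s2 Y x) (fr, m)).2 ∧
      pvShape m0 ((List.range n).foldl (fun s2 x => pvStepB (-1) 0 s2 Y x) (fr, m)).2 ∧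
      pvInvW ((List.range n).foldl (fun s2 x => pvStepB (-1) 0 s2 Y x) (fr, m)).2
             ((List.range n).foldl (fun s2 x => pvStepB (-1) 0 s2 Y x) (fr, m)).1 Y n := by
  intro n
  induction n with
  | zero =>
    intro _
    simp only [List.range_zero, List.foldl_nil]
    exact ⟨by trivial, hsh, hinv⟩
  | succ n ih =>
    intro hn
    obtain ⟨he, hs, hi⟩ := ih (by omega)
    rw [List.range_succ, List.foldl_append, List.foldl_append, List.foldl_cons,
      List.foldl_nil, List.foldl_cons, List.foldl_nil, he]
    have hX : n < ((((List.range n).foldl (fun s2 x => pvStepB (-1) 0 s2 Y x) (fr, m)).2).getD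
        Y []).length := by
      rw [hs.2 Y]; omega
    have hstep := pv_stepW m0
      ((List.range n).foldl (fun s2 x => pvStepB (-1) 0 s2 Y x) (fr, m)).2
      ((List.range n).foldl (fun s2 x => pvStepB (-1) 0 s2 Y x) (fr, m)).1
      Y n hs hY hX hi
    simp only [Prod.mk.eta] at hstep
    exact hstep

theorem pv_outerW (m0 : List (List String)) :
    ∀ Y, Y ≤ m0.length →
      (List.range Y).foldl (fun m y => (List.range ((m.getD y []).length)).foldl
          (fun m2 x => pvStepA (-1) 0 m2 y x) m) m0
        = ((List.range Y).foldl (fun s y => (List.range ((s.2.getD y []).length)).foldl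
          (fun s2 x => pvStepB (-1) 0 s2 y x) s) (PySem.Dict.empty, m0)).2 ∧
      pvShape m0 ((List.range Y).foldl (fun s y => (List.range ((s.2.getD y []).length)).foldl
          (fun s2 x => pvStepB (-1) 0 s2 y x) s) (PySem.Dict.empty, m0)).2 ∧
      (∀ y' : Nat, Y ≤ y' →
        ((List.range Y).foldl (fun s y => (List.range ((s.2.getD y []).length)).foldl
          (fun s2 x => pvStepB (-1) 0 s2 y x) s) (PySem.Dict.empty, m0)).1.get? (y' : Int)
          = none) := by
  intro Y
  induction Y with
  | zero =>
    intro _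
    simp only [List.range_zero, List.foldl_nil]
    exact ⟨by trivial, pvShape_refl m0, fun y' _ => PySem.Dict.get?_empty _⟩
  | succ Y ih =>
    intro hY1
    obtain ⟨he, hs, hn⟩ := ih (by omega)
    rw [List.range_succ, List.foldl_append, List.foldl_append, List.foldl_cons,
      List.foldl_nil, List.foldl_cons, List.foldl_nil, he]
    have hgD : (((List.range Y).foldl (fun s y => (List.range ((s.2.getD y []).length)).foldl
          (fun s2 x => pvStepB (-1) 0 s2 y x) s) (PySem.Dict.empty, m0)).1).getD (Y : Int) 0
        = 0 := by
      rw [PySem.Dict.getD_eq_get?_getD, hn Y (le_refl Y)]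
      rfl
    have hinv : pvInvW ((List.range Y).foldl (fun s y => (List.range ((s.2.getD y []).length)).foldl
          (fun s2 x => pvStepB (-1) 0 s2 y x) s) (PySem.Dict.empty, m0)).2
        ((List.range Y).foldl (fun s y => (List.range ((s.2.getD y []).length)).foldl
          (fun s2 x => pvStepB (-1) 0 s2 y x) s) (PySem.Dict.empty, m0)).1 Y 0 := by
      refine ⟨fun y' hy' => hn y' (by omega), by rw [hgD], fun j hj1 hj2 => by omega,
        Or.inl hgD⟩
    have hrow : ((((List.range Y).foldl (fun s y => (List.range ((s.2.getD y []).length)).foldl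
          (fun s2 x => pvStepB (-1) 0 s2 y x) s) (PySem.Dict.empty, m0)).2).getD Y []).length
        = (m0.getD Y []).length := hs.2 Y
    rw [hrow]
    have hfold := pv_foldW m0 Y (by omega) _ _ hs hinv (m0.getD Y []).length (le_refl _)
    simp only [Prod.mk.eta] at hfold
    exact ⟨hfold.1, hfold.2.1, fun y' hy' => hfold.2.2.1 y' (by omega)⟩

theorem pv_west (m0 : List (List String)) :
    tilt_nw m0 (-1) 0 = tilt_nw_alt m0 (-1) 0 := by
  unfold tilt_nw tilt_nw_alt
  exact (pv_outerW m0 m0.length (le_refl _)).1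

theorem pv_north (m0 : List (List String)) (h : pvRect m0) :
    tilt_nw m0 0 (-1) = tilt_nw_alt m0 0 (-1) := by
  unfold tilt_nw tilt_nw_alt
  exact (pv_outerN m0 ((m0.headD []).length) h m0.length (le_refl _)).1

-- ===== VERDICT (by name: the statement is the Claim_ definition above) =====
theorem tilt_nw_spec : Claim_equal_tilt_nw := by
  intro matrix dirx diry _hdom hpre
  unfold Spec_tilt_nw
  rcases hpre with h | ⟨hx, hy⟩ | ⟨hr, hx, hy⟩
  · rw [pv_noO_A matrix dirx diry h, pv_noO_B matrix dirx diry h]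
  · subst hx; subst hy; exact pv_west matrix
  · subst hx; subst hy; exact pv_north matrix hr
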